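-- pv_equiv track=rewrite | github.com/fhfweb/sinc-orchestrator | scripts/memory_sync.py | _build_embedding_endpoints
-- ===== SOURCE A (Python) =====
-- def resolve_ollama_base_url(url):
--     normalized = (url or "").strip().rstrip("/")
--     if not normalized:
--         return ""
--     for marker in ("/api/", "/v1/"):
--         marker_index = normalized.lower().find(marker)
--         if marker_index >= 0:
--             return normalized[:marker_index]
--     return normalized
--
-- def _build_embedding_endpoints(url):
--     normalized = (url or "").strip().rstrip("/")
--     if not normalized:
--         return []
--
--     base_url = resolve_ollama_base_url(normalized)
--     endpoints = [normalized]
--     if normalized.endswith("/api/embeddings"):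
--         endpoints.append(normalized[: -len("/api/embeddings")] + "/api/embed")
--         endpoints.append(normalized[: -len("/api/embeddings")] + "/v1/embeddings")
--     elif normalized.endswith("/api/embed"):
--         endpoints.append(normalized[: -len("/api/embed")] + "/api/embeddings")
--         endpoints.append(normalized[: -len("/api/embed")] + "/v1/embeddings")
--     elif normalized.endswith("/v1/embeddings"):
--         endpoints.append(normalized[: -len("/v1/embeddings")] + "/api/embeddings")
--         endpoints.append(normalized[: -len("/v1/embeddings")] + "/api/embed")
--     elif base_url:
--         endpoints.append(f"{base_url}/api/embeddings")
--         endpoints.append(f"{base_url}/api/embed")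
--         endpoints.append(f"{base_url}/v1/embeddings")
--
--     seen = set()
--     ordered = []
--     for endpoint in endpoints:
--         if endpoint and endpoint not in seen:
--             seen.add(endpoint)
--             ordered.append(endpoint)
--     return ordered
-- ===== SOURCE B (Python) =====
-- SUFFIXES = ("/api/embeddings", "/api/embed", "/v1/embeddings")
--
--
-- def resolve_ollama_base_url(url):
--     normalized = (url or "").strip().rstrip("/")
--     if not normalized:
--         return ""
--     for marker in ("/api/", "/v1/"):
--         marker_index = normalized.lower().find(marker)
--         if marker_index >= 0:
--             return normalized[:marker_index]
--     return normalized
--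
--
-- def _second_last_slash(s):
--     # index of the second '/' met when walking s from the end, or -1
--     i = len(s) - 1
--     count = 0
--     while i >= 0:
--         if s[i] == "/":
--             count += 1
--             if count == 2:
--                 return i
--         i -= 1
--     return -1
--
--
-- def _build_embedding_endpoints(url):
--     normalized = (url or "").strip().rstrip("/")
--     if not normalized:
--         return []
--     cut = _second_last_slash(normalized)
--     tail = normalized[cut:] if cut >= 0 else ""
--     if tail in SUFFIXES:
--         stem = normalized[:cut]
--     else:
--         stem = resolve_ollama_base_url(normalized)
--         if not stem:
--             return [normalized]
--     return list(dict.fromkeys([normalized] + [stem + s for s in SUFFIXES]))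
-- ===== Notes on version B (the rewrite author's own statement) =====
-- stated objective: alternative
-- what changed: Instead of A's chain of three endswith tests each building its own sibling pair, B finds the second-last '/' by one reverse character scan, takes the tail from there and tests it for membership in the suffix table, then uniformly emits stem+s for ALL three suffixes and lets an order-preserving dedup (dict.fromkeys) drop the candidate equal to the original URL.
import Mathlib
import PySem

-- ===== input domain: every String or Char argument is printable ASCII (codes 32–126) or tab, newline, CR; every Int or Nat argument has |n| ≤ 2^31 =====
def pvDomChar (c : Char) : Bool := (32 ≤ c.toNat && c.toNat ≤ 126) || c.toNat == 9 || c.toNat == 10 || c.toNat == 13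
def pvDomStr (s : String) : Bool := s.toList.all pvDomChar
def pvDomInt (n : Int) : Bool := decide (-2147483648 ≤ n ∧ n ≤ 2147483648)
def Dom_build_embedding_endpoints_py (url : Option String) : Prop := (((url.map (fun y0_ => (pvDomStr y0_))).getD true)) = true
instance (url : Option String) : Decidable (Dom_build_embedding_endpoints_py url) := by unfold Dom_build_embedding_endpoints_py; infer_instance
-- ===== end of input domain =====

-- B replaces A's chain of endswith tests with hand-written sibling pairs by one reverse scan
-- for the second-last '/', a table membership test on the tail, and a uniform candidate list
-- deduplicated in order (objective: alternative; same cost).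


-- ===== PORT A =====
-- s.rstrip("/") : PySem has no one-sided strip-with-chars, so this is ported by hand;
-- exact: drops exactly the trailing '/' characters.
def pyRstripSlash (s : String) : String :=
  String.ofList ((s.toList.reverse.dropWhile (fun c => c == '/')).reverse)

def pyNormalize (url : Option String) : String :=
  pyRstripSlash (PySem.Str.strip (url.getD ""))

-- the 'for marker in ("/api/", "/v1/")' loop of resolve_ollama_base_url (early return)
def pyMarkerLoop (normalized : String) : List String → String
  | [] => normalized
  | m :: rest =>
      let marker_index := PySem.Str.find (PySem.Str.lower normalized) m
      if 0 ≤ marker_index then PySem.Str.slice normalized none (some marker_index)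
      else pyMarkerLoop normalized rest

def resolve_ollama_base_url (url : Option String) : String :=
  let normalized := pyNormalize url
  if normalized = "" then ""
  else pyMarkerLoop normalized ["/api/", "/v1/"]

def build_embedding_endpoints_py (url : Option String) : List String :=
  let normalized := pyNormalize url
  if normalized = "" then []
  else
    let base_url := resolve_ollama_base_url (some normalized)
    let endpoints : List String :=
      if PySem.Str.endswith normalized "/api/embeddings" then
        [normalized,
         PySem.Str.slice normalized none (some (-15)) ++ "/api/embed",
         PySem.Str.slice normalized none (some (-15)) ++ "/v1/embeddings"]
      else if PySem.Str.endswith normalized "/api/embed" then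
        [normalized,
         PySem.Str.slice normalized none (some (-10)) ++ "/api/embeddings",
         PySem.Str.slice normalized none (some (-10)) ++ "/v1/embeddings"]
      else if PySem.Str.endswith normalized "/v1/embeddings" then
        [normalized,
         PySem.Str.slice normalized none (some (-14)) ++ "/api/embeddings",
         PySem.Str.slice normalized none (some (-14)) ++ "/api/embed"]
      else if base_url ≠ "" then
        [normalized,
         base_url ++ "/api/embeddings",
         base_url ++ "/api/embed",
         base_url ++ "/v1/embeddings"]
      else [normalized]
    -- seen = set(); ordered = []; for endpoint in endpoints: …
    (endpoints.foldl
      (fun (p : PySem.Set String × List String) e =>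
        if e ≠ "" ∧ PySem.Set.contains p.1 e = false then (PySem.Set.add p.1 e, p.2 ++ [e])
        else p)
      (PySem.Set.empty, [])).2

-- ===== PORT B =====
def pySuffixes : List String := ["/api/embeddings", "/api/embed", "/v1/embeddings"]

-- _second_last_slash's while loop: index i = k - 1 runs from len(s)-1 down to 0,
-- counting '/' characters, returning i at the second one
def slashScan (s : List Char) : Nat → Nat → Int
  | _, 0 => -1
  | count, k + 1 =>
      if PySem.List.pyGet? s (k : Int) = some '/' then
        if count + 1 = 2 then (k : Int) else slashScan s (count + 1) k
      else slashScan s count k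

def second_last_slash (s : String) : Int := slashScan s.toList 0 s.toList.length

def build_embedding_endpoints_py_alt (url : Option String) : List String :=
  let normalized := pyNormalize url
  if normalized = "" then []
  else
    let cut := second_last_slash normalized
    let tail := if 0 ≤ cut then PySem.Str.slice normalized (some cut) none else ""
    if pySuffixes.contains tail then
      PySem.List.dedup (normalized ::
        pySuffixes.map (fun s => PySem.Str.slice normalized none (some cut) ++ s))
    else
      let stem := resolve_ollama_base_url (some normalized)
      if stem = "" then [normalized]
      else PySem.List.dedup (normalized :: pySuffixes.map (fun s => stem ++ s))

-- ===== PRECONDITION & SPEC =====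
def Spec_build_embedding_endpoints_py (url : Option String) (out : List String) : Prop := out = build_embedding_endpoints_py_alt url
instance (url : Option String) (out : List String) : Decidable (Spec_build_embedding_endpoints_py url out) := by unfold Spec_build_embedding_endpoints_py; infer_instance

-- ===== CLAIM (what is proved, stated in full; the proofs are below) =====
def Claim_equal_build_embedding_endpoints_py : Prop := ∀ (url : Option String), Dom_build_embedding_endpoints_py url → Spec_build_embedding_endpoints_py url (build_embedding_endpoints_py url)

-- ===== LEMMAS AND PROOFS =====

-- A's seen/ordered dedup loop equals dict.fromkeys over the non-empty candidates.
theorem dedupLoop_aux (xs : List String) : ∀ (a : List String),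
    (xs.foldl
      (fun (p : PySem.Set String × List String) e =>
        if e ≠ "" ∧ PySem.Set.contains p.1 e = false then (PySem.Set.add p.1 e, p.2 ++ [e])
        else p)
      (a, a)).2
    = (xs.filter (fun c => c ≠ "")).foldl PySem.Set.add a := by
  induction xs with
  | nil => intro a; rfl
  | cons e rest ih =>
    intro a
    by_cases he : e = ""
    · simp only [List.foldl_cons, List.filter_cons, he]
      rw [if_neg (by simp), if_neg (by simp)]
      exact ih a
    · by_cases hc : e ∈ a
      · have hcon : PySem.Set.contains a e = true := by
          simpa [PySem.Set.contains_iff] using hc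
        have hadd : PySem.Set.add a e = a := PySem.Set.add_of_mem hc
        simp only [List.foldl_cons, List.filter_cons]
        have hnot : ¬(e ≠ "" ∧ PySem.Set.contains a e = false) := fun h => by
          rw [hcon] at h; exact absurd h.2 (by simp)
        rw [if_neg hnot, if_pos (by simp [he])]
        rw [List.foldl_cons, hadd]
        exact ih a
      · have hcon : PySem.Set.contains a e = false := by
          simpa [PySem.Set.contains_iff] using hc
        have hadd : PySem.Set.add a e = a ++ [e] := PySem.Set.add_of_not_mem hc
        simp only [List.foldl_cons, List.filter_cons]
        rw [if_pos ⟨he, hcon⟩, if_pos (by simp [he])]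
        rw [List.foldl_cons, hadd]
        exact ih (a ++ [e])

theorem dedupLoop_eq (xs : List String) :
    (xs.foldl
      (fun (p : PySem.Set String × List String) e =>
        if e ≠ "" ∧ PySem.Set.contains p.1 e = false then (PySem.Set.add p.1 e, p.2 ++ [e])
        else p)
      (PySem.Set.empty, [])).2
    = PySem.List.dedup (xs.filter (fun c => c ≠ "")) := by
  exact dedupLoop_aux xs []

-- slashScan only reads indices below k
theorem slashScan_append_of_le (zs : List Char) :
    ∀ (k : Nat) (xs : List Char) (c : Nat), k ≤ xs.length →
      slashScan (xs ++ zs) c k = slashScan xs c k := by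
  intro k
  induction k with
  | zero => intro xs c _; rfl
  | succ k ih =>
    intro xs c h
    have hget : PySem.List.pyGet? (xs ++ zs) (k : Int) = PySem.List.pyGet? xs (k : Int) := by
      rw [PySem.List.pyGet?_natCast, PySem.List.pyGet?_natCast,
        List.getElem?_append_left (by omega)]
    simp only [slashScan, hget]
    split_ifs <;> first | rfl | exact ih _ _ (by omega)

-- scanning pre ++ suf from the top: if the second '/' is found inside suf,
-- the result is len(pre) + (result of scanning suf alone)
theorem slashScan_shift :
    ∀ (suf : List Char) (c : Nat) (pre : List Char), slashScan suf c suf.length ≠ -1 →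
      slashScan (pre ++ suf) c (pre.length + suf.length)
        = (pre.length : Int) + slashScan suf c suf.length := by
  intro suf
  induction suf using List.reverseRecOn with
  | nil => intro c pre h; exact absurd rfl h
  | append_singleton ys a ih =>
    intro c pre h
    have hget1 : PySem.List.pyGet? (pre ++ (ys ++ [a])) ((pre.length + ys.length : Nat) : Int)
        = some a := by
      rw [PySem.List.pyGet?_natCast, ← List.append_assoc,
        show pre.length + ys.length = (pre ++ ys).length from (List.length_append).symm]
      exact List.getElem?_concat_length
    have hget2 : PySem.List.pyGet? (ys ++ [a]) ((ys.length : Nat) : Int) = some a := by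
      rw [PySem.List.pyGet?_natCast]
      exact List.getElem?_concat_length
    have hlen : (ys ++ [a]).length = ys.length + 1 := by simp
    rw [hlen] at h ⊢
    have hirr1 : slashScan (pre ++ (ys ++ [a])) (c + 1) (pre.length + ys.length)
        = slashScan (pre ++ ys) (c + 1) (pre.length + ys.length) := by
      rw [← List.append_assoc]
      exact slashScan_append_of_le [a] _ _ _ (by simp)
    have hirr1' : slashScan (pre ++ (ys ++ [a])) c (pre.length + ys.length)
        = slashScan (pre ++ ys) c (pre.length + ys.length) := by
      rw [← List.append_assoc]
      exact slashScan_append_of_le [a] _ _ _ (by simp)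
    have hirr2 : slashScan (ys ++ [a]) (c + 1) ys.length = slashScan ys (c + 1) ys.length :=
      slashScan_append_of_le [a] _ _ _ le_rfl
    have hirr2' : slashScan (ys ++ [a]) c ys.length = slashScan ys c ys.length :=
      slashScan_append_of_le [a] _ _ _ le_rfl
    show slashScan (pre ++ (ys ++ [a])) c ((pre.length + ys.length) + 1) = _
    simp only [slashScan, hget1, hget2] at h ⊢
    split_ifs at h ⊢ with h1 h2
    · push_cast; ring
    · rw [hirr1, hirr2]
      rw [hirr2] at h
      exact ih (c + 1) pre h
    · rw [hirr1', hirr2']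
      rw [hirr2'] at h
      exact ih c pre h

-- scanning each suffix alone finds its second '/' at index 0
theorem scan_s1 : slashScan ("/api/embeddings" : String).toList 0 ("/api/embeddings" : String).toList.length = 0 := by decide
theorem scan_s2 : slashScan ("/api/embed" : String).toList 0 ("/api/embed" : String).toList.length = 0 := by decide
theorem scan_s3 : slashScan ("/v1/embeddings" : String).toList 0 ("/v1/embeddings" : String).toList.length = 0 := by decide

-- when n ends with such a suffix, the reverse scan stops exactly at the suffix start
theorem pv_cut_of_endswith (n suf : String)
    (hsc : slashScan suf.toList 0 suf.toList.length = 0)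
    (h : PySem.Str.endswith n suf = true) :
    ∃ pre : List Char, n.toList = pre ++ suf.toList ∧ second_last_slash n = (pre.length : Int) := by
  have hsuffix : suf.toList <:+ n.toList := by
    rw [← PySem.Chars.endswith_iff, ← PySem.Str.endswith_eq]
    exact h
  obtain ⟨pre, hpre⟩ := hsuffix
  refine ⟨pre, hpre.symm, ?_⟩
  unfold second_last_slash
  rw [← hpre, List.length_append,
    slashScan_shift suf.toList 0 pre (by rw [hsc]; decide), hsc]
  simp

theorem pv_mem_foldl_add (x : String) :
    ∀ (l s : List String), x ∈ s → x ∈ l.foldl PySem.Set.add s := by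
  intro l
  induction l with
  | nil => intro s h; simpa using h
  | cons y t ih =>
    intro s h
    exact ih _ ((PySem.Set.mem_add _ _ _).mpr (Or.inl h))

-- dict.fromkeys ignores a later copy of the first key
theorem pv_dedup_dropDup (a : String) (p q : List String) :
    PySem.List.dedup (a :: (p ++ a :: q)) = PySem.List.dedup (a :: (p ++ q)) := by
  simp only [PySem.List.dedup_eq_ofList, PySem.Set.ofList_eq_foldl, List.foldl_cons,
    List.foldl_append, List.foldl_cons]
  rw [PySem.Set.add_of_mem
    (pv_mem_foldl_add a p _ (by simp [PySem.Set.add, PySem.Set.contains]))]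

theorem pv_dd1 (a y z : String) :
    PySem.List.dedup [a, a, y, z] = PySem.List.dedup [a, y, z] := by
  simpa using pv_dedup_dropDup a [] [y, z]
theorem pv_dd2 (a x z : String) :
    PySem.List.dedup [a, x, a, z] = PySem.List.dedup [a, x, z] := by
  simpa using pv_dedup_dropDup a [x] [z]
theorem pv_dd3 (a x y : String) :
    PySem.List.dedup [a, x, y, a] = PySem.List.dedup [a, x, y] := by
  simpa using pv_dedup_dropDup a [x, y] []

theorem pv_append_ne_empty (s t : String) (ht : t ≠ "") : s ++ t ≠ "" := by
  intro he
  apply ht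
  have h2 := congrArg String.toList he
  simp only [String.toList_append] at h2
  simp at h2
  exact h2.2

-- ===== VERDICT (by name: the statement is the Claim_ definition above) =====
set_option maxHeartbeats 1000000 in
theorem build_embedding_endpoints_py_spec : Claim_equal_build_embedding_endpoints_py := by
  intro url _
  unfold Spec_build_embedding_endpoints_py
  unfold build_embedding_endpoints_py build_embedding_endpoints_py_alt
  generalize pyNormalize url = n
  by_cases h0 : n = ""
  · simp only [h0, if_pos]
  · simp only [if_neg h0, dedupLoop_eq]
    by_cases h1 : PySem.Str.endswith n "/api/embeddings" = true
    · obtain ⟨pre, hpre, hcut⟩ := pv_cut_of_endswith n _ scan_s1 h1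
      have hlenn : n.toList.length = pre.length + 15 := by
        rw [hpre, List.length_append]; rfl
      have h0le : (0 : Int) ≤ second_last_slash n := by
        rw [hcut]; exact_mod_cast Nat.zero_le _
      have htail : PySem.Str.slice n (some (second_last_slash n)) none = "/api/embeddings" := by
        apply String.toList_inj.mp
        rw [hcut]
        simp only [PySem.Str.toList_slice, PySem.Chars.slice_eq_listSlice,
          PySem.List.slice_from_natCast, hpre]
        exact List.drop_left
      have hstem : PySem.Str.slice n none (some (-15))
          = PySem.Str.slice n none (some (second_last_slash n)) := by
        apply String.toList_inj.mp
        rw [hcut]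
        simp only [PySem.Str.toList_slice, PySem.Chars.slice_eq_listSlice,
          PySem.List.slice_to_natCast]
        rw [PySem.List.slice_to_neg_ofNat _ 15 (by omega), hlenn]
        simp
      have hdecomp : PySem.Str.slice n none (some (second_last_slash n)) ++ "/api/embeddings" = n := by
        apply String.toList_inj.mp
        rw [hcut]
        simp only [String.toList_append, PySem.Str.toList_slice, PySem.Chars.slice_eq_listSlice,
          PySem.List.slice_to_natCast, hpre]
        rw [List.take_left]
      have hcont : (["/api/embeddings", "/api/embed", "/v1/embeddings"] : List String).contains
          (if 0 ≤ second_last_slash n then PySem.Str.slice n (some (second_last_slash n)) none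
           else "") = true := by
        rw [if_pos h0le, htail]; decide
      have hne2 : PySem.Str.slice n none (some (-15)) ++ "/api/embed" ≠ "" :=
        pv_append_ne_empty _ _ (by decide)
      have hne3 : PySem.Str.slice n none (some (-15)) ++ "/v1/embeddings" ≠ "" :=
        pv_append_ne_empty _ _ (by decide)
      simp only [if_pos h1, pySuffixes, List.map]
      simp only [hcont, reduceIte]
      rw [show ([n, PySem.Str.slice n none (some (-15)) ++ "/api/embed",
            PySem.Str.slice n none (some (-15)) ++ "/v1/embeddings"].filter (fun c => c ≠ ""))
          = [n, PySem.Str.slice n none (some (-15)) ++ "/api/embed",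
             PySem.Str.slice n none (some (-15)) ++ "/v1/embeddings"] from by
        simp [h0, hne2, hne3]]
      rw [hstem, hdecomp]
      exact (pv_dd1 _ _ _).symm
    · by_cases h2 : PySem.Str.endswith n "/api/embed" = true
      · obtain ⟨pre, hpre, hcut⟩ := pv_cut_of_endswith n _ scan_s2 h2
        have hlenn : n.toList.length = pre.length + 10 := by
          rw [hpre, List.length_append]; rfl
        have h0le : (0 : Int) ≤ second_last_slash n := by
          rw [hcut]; exact_mod_cast Nat.zero_le _
        have htail : PySem.Str.slice n (some (second_last_slash n)) none = "/api/embed" := by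
          apply String.toList_inj.mp
          rw [hcut]
          simp only [PySem.Str.toList_slice, PySem.Chars.slice_eq_listSlice,
            PySem.List.slice_from_natCast, hpre]
          exact List.drop_left
        have hstem : PySem.Str.slice n none (some (-10))
            = PySem.Str.slice n none (some (second_last_slash n)) := by
          apply String.toList_inj.mp
          rw [hcut]
          simp only [PySem.Str.toList_slice, PySem.Chars.slice_eq_listSlice,
            PySem.List.slice_to_natCast]
          rw [PySem.List.slice_to_neg_ofNat _ 10 (by omega), hlenn]
          simp
        have hdecomp : PySem.Str.slice n none (some (second_last_slash n)) ++ "/api/embed" = n := by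
          apply String.toList_inj.mp
          rw [hcut]
          simp only [String.toList_append, PySem.Str.toList_slice, PySem.Chars.slice_eq_listSlice,
            PySem.List.slice_to_natCast, hpre]
          rw [List.take_left]
        have hcont : (["/api/embeddings", "/api/embed", "/v1/embeddings"] : List String).contains
            (if 0 ≤ second_last_slash n then PySem.Str.slice n (some (second_last_slash n)) none
             else "") = true := by
          rw [if_pos h0le, htail]; decide
        have hne2 : PySem.Str.slice n none (some (-10)) ++ "/api/embeddings" ≠ "" :=
          pv_append_ne_empty _ _ (by decide)
        have hne3 : PySem.Str.slice n none (some (-10)) ++ "/v1/embeddings" ≠ "" :=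
          pv_append_ne_empty _ _ (by decide)
        simp only [if_neg h1, if_pos h2, pySuffixes, List.map]
        simp only [hcont, reduceIte]
        rw [show ([n, PySem.Str.slice n none (some (-10)) ++ "/api/embeddings",
              PySem.Str.slice n none (some (-10)) ++ "/v1/embeddings"].filter (fun c => c ≠ ""))
            = [n, PySem.Str.slice n none (some (-10)) ++ "/api/embeddings",
               PySem.Str.slice n none (some (-10)) ++ "/v1/embeddings"] from by
          simp [h0, hne2, hne3]]
        rw [hstem, hdecomp]
        exact (pv_dd2 _ _ _).symm
      · by_cases h3 : PySem.Str.endswith n "/v1/embeddings" = true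
        · obtain ⟨pre, hpre, hcut⟩ := pv_cut_of_endswith n _ scan_s3 h3
          have hlenn : n.toList.length = pre.length + 14 := by
            rw [hpre, List.length_append]; rfl
          have h0le : (0 : Int) ≤ second_last_slash n := by
            rw [hcut]; exact_mod_cast Nat.zero_le _
          have htail : PySem.Str.slice n (some (second_last_slash n)) none = "/v1/embeddings" := by
            apply String.toList_inj.mp
            rw [hcut]
            simp only [PySem.Str.toList_slice, PySem.Chars.slice_eq_listSlice,
              PySem.List.slice_from_natCast, hpre]
            exact List.drop_left
          have hstem : PySem.Str.slice n none (some (-14))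
              = PySem.Str.slice n none (some (second_last_slash n)) := by
            apply String.toList_inj.mp
            rw [hcut]
            simp only [PySem.Str.toList_slice, PySem.Chars.slice_eq_listSlice,
              PySem.List.slice_to_natCast]
            rw [PySem.List.slice_to_neg_ofNat _ 14 (by omega), hlenn]
            simp
          have hdecomp : PySem.Str.slice n none (some (second_last_slash n)) ++ "/v1/embeddings" = n := by
            apply String.toList_inj.mp
            rw [hcut]
            simp only [String.toList_append, PySem.Str.toList_slice, PySem.Chars.slice_eq_listSlice,
              PySem.List.slice_to_natCast, hpre]
            rw [List.take_left]
          have hcont : (["/api/embeddings", "/api/embed", "/v1/embeddings"] : List String).contains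
              (if 0 ≤ second_last_slash n then PySem.Str.slice n (some (second_last_slash n)) none
               else "") = true := by
            rw [if_pos h0le, htail]; decide
          have hne2 : PySem.Str.slice n none (some (-14)) ++ "/api/embeddings" ≠ "" :=
            pv_append_ne_empty _ _ (by decide)
          have hne3 : PySem.Str.slice n none (some (-14)) ++ "/api/embed" ≠ "" :=
            pv_append_ne_empty _ _ (by decide)
          simp only [if_neg h1, if_neg h2, if_pos h3, pySuffixes, List.map]
          simp only [hcont, reduceIte]
          rw [show ([n, PySem.Str.slice n none (some (-14)) ++ "/api/embeddings",
                PySem.Str.slice n none (some (-14)) ++ "/api/embed"].filter (fun c => c ≠ ""))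
              = [n, PySem.Str.slice n none (some (-14)) ++ "/api/embeddings",
                 PySem.Str.slice n none (some (-14)) ++ "/api/embed"] from by
            simp [h0, hne2, hne3]]
          rw [hstem, hdecomp]
          exact (pv_dd3 _ _ _).symm
        · -- no suffix matches: B's tail is not in the table
          have hcont : (["/api/embeddings", "/api/embed", "/v1/embeddings"] : List String).contains
              (if 0 ≤ second_last_slash n then PySem.Str.slice n (some (second_last_slash n)) none
               else "") = false := by
            by_cases hge : 0 ≤ second_last_slash n
            · rw [if_pos hge]
              by_contra hc
              rw [Bool.not_eq_false] at hc
              have hmem : PySem.Str.slice n (some (second_last_slash n)) none = "/api/embeddings"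
                  ∨ PySem.Str.slice n (some (second_last_slash n)) none = "/api/embed"
                  ∨ PySem.Str.slice n (some (second_last_slash n)) none = "/v1/embeddings" := by
                simpa [pySuffixes] using hc
              have hsuf : (PySem.Str.slice n (some (second_last_slash n)) none).toList <:+ n.toList := by
                simp only [PySem.Str.toList_slice, PySem.Chars.slice_eq_listSlice,
                  PySem.List.slice_from _ hge]
                exact List.drop_suffix _ _
              rcases hmem with he | he | he
              · exact h1 (by rw [← he]; simpa [PySem.Chars.endswith_iff] using hsuf)
              · exact h2 (by rw [← he]; simpa [PySem.Chars.endswith_iff] using hsuf)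
              · exact h3 (by rw [← he]; simpa [PySem.Chars.endswith_iff] using hsuf)
            · rw [if_neg hge]; decide
          simp only [if_neg h1, if_neg h2, if_neg h3, pySuffixes, List.map]
          simp only [hcont, Bool.false_eq_true, if_false]
          by_cases hb : resolve_ollama_base_url (some n) = ""
          · rw [hb]
            rw [if_neg (by simp : ¬("" : String) ≠ ""), if_pos rfl]
            rw [show [n].filter (fun c => c ≠ "") = [n] from by simp [h0]]
            rw [PySem.List.dedup_eq_ofList, PySem.Set.ofList_eq_foldl,
              List.foldl_cons, List.foldl_nil, PySem.Set.add_of_not_mem (List.not_mem_nil)]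
            rfl
          · have hn1 : resolve_ollama_base_url (some n) ++ "/api/embeddings" ≠ "" :=
              pv_append_ne_empty _ _ (by decide)
            have hn2 : resolve_ollama_base_url (some n) ++ "/api/embed" ≠ "" :=
              pv_append_ne_empty _ _ (by decide)
            have hn3 : resolve_ollama_base_url (some n) ++ "/v1/embeddings" ≠ "" :=
              pv_append_ne_empty _ _ (by decide)
            simp only [if_neg hb, if_pos hb]
            rw [show ([n, resolve_ollama_base_url (some n) ++ "/api/embeddings",
                  resolve_ollama_base_url (some n) ++ "/api/embed",
                  resolve_ollama_base_url (some n) ++ "/v1/embeddings"].filter (fun c => c ≠ ""))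
                = [n, resolve_ollama_base_url (some n) ++ "/api/embeddings",
                   resolve_ollama_base_url (some n) ++ "/api/embed",
                   resolve_ollama_base_url (some n) ++ "/v1/embeddings"] from by
              simp [h0, hn1, hn2, hn3]]
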